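-- pv_equiv track=rewrite | github.com/Omkar02/FAANG | A_G_M_Dynamic_Programing_2.py | OBST
-- ===== SOURCE A (Python) =====
-- cnt = [0]
--
-- def OBST(freq, i, j):
--     cnt[0] += 1
--     if i > j:
--         return 0
--     if i == j:
--         return freq[i]
--
--     cost = float('inf')
--     fSum = sum(freq[i:j + 1])
--     for k in range(i, j + 1):
--         currCost = OBST(freq, i, k - 1) + OBST(freq, k + 1, j)
--         cost = min(cost, currCost)
--
--     return cost + fSum
-- ===== SOURCE B (Python) =====
-- def OBST(freq, i, j):
--     # Bottom-up interval DP: fill a table of subinterval costs by increasing length.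
--     if i > j:
--         return 0
--     dp = {}
--     for a in range(i, j + 1):
--         dp[(a, a)] = freq[a]
--     for length in range(2, j - i + 2):
--         for a in range(i, j - length + 2):
--             b = a + length - 1
--             best = min(dp.get((a, k - 1), 0) + dp.get((k + 1, b), 0)
--                        for k in range(a, b + 1))
--             dp[(a, b)] = best + sum(freq[a:b + 1])
--     return dp[(i, j)]
-- ===== Notes on version B (the rewrite author's own statement) =====
-- stated objective: alternative
-- what changed: B replaces A's top-down exhaustive interval recursion by an iterative bottom-up interval DP: a table keyed by (a, b) is filled by increasing interval length with no recursion, each subproblem computed once; A's module-level counter side effect is not reproduced.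
import Mathlib
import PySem

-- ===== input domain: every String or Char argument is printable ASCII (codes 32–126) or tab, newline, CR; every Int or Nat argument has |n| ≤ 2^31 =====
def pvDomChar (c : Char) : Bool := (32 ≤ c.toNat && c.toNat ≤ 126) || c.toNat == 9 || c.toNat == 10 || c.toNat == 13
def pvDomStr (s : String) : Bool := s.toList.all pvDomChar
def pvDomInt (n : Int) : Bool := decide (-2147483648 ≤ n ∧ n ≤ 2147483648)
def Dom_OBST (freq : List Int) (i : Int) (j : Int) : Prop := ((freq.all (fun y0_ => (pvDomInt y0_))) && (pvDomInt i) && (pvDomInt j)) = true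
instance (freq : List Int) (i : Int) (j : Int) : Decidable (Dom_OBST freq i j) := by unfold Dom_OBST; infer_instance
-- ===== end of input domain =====

-- B replaces A's top-down exhaustive interval recursion by an iterative bottom-up interval
-- DP: a table dp keyed by (a, b) is filled by increasing interval length, no recursion at all,
-- each subproblem computed once.
-- A also increments a module-level counter cnt, a side effect B does not reproduce — the
-- equivalence proved here is about the return value only.
-- The Nat fuel/counter parameters of the loop helpers only mirror the Python range bounds;
-- they are always large enough, so they never change the value.

-- ===== PORT A =====
-- A's 'for k in range(i, j+1)' is transliterated as the recursion OBST.loopA on the offset d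
-- (k = i + d, stopping on Python's own condition k > j; rem is fuel only), carrying the
-- running minimum; 'cost = float("inf")' is the initial 'none' (min none x = x, exactly
-- Python's min(inf, x) on the first iteration); the recursive call comes in as 'rec'.
def OBST.loopA (freq : List Int) (rec : Int → Int → Int) (i : Int) (j : Int) (d : Nat)
    (rem : Nat) (cost : Option Int) : Option Int :=
  match rem with
  | 0 => cost
  | rem + 1 =>
    if j < i + (d : Int) then cost
    else
      let curr := rec i (i + (d : Int) - 1) + rec (i + (d : Int) + 1) j
      OBST.loopA freq rec i j (d + 1) rem
        (some (match cost with | none => curr | some c => min c curr))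

def OBST.go (freq : List Int) (fuel : Nat) (i : Int) (j : Int) : Int :=
  match fuel with
  | 0 => 0
  | fuel + 1 =>
    if i > j then 0
    else if i = j then (PySem.List.pyGet? freq i).getD 0
    else
      let fSum := (PySem.List.slice freq (some i) (some (j + 1))).sum
      Option.getD (OBST.loopA freq (OBST.go freq fuel) i j 0 (j - i + 1).toNat none) 0 + fSum

def OBST (freq : List Int) (i : Int) (j : Int) : Int :=
  OBST.go freq ((j - i + 1).toNat + 1) i j

-- ===== PORT B =====
-- 'min(dp.get((a, k-1), 0) + dp.get((k+1, b), 0) for k in range(a, b+1))': k = a + d,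
-- stop once k > b; the running minimum starts as 'none' (first element of the generator).
def OBST_alt.minLoop (dp : PySem.Dict (Int × Int) Int) (a : Int) (b : Int) (d : Nat)
    (rem : Nat) (cost : Option Int) : Option Int :=
  match rem with
  | 0 => cost
  | rem + 1 =>
    if b < a + (d : Int) then cost
    else
      let k := a + (d : Int)
      let curr := PySem.Dict.getD dp (a, k - 1) 0 + PySem.Dict.getD dp (k + 1, b) 0
      OBST_alt.minLoop dp a b (d + 1) rem
        (some (match cost with | none => curr | some c => min c curr))

-- 'for a in range(i, j - length + 2)': a = i + d, stop once a > j - L + 1.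
def OBST_alt.aLoop (freq : List Int) (i : Int) (j : Int) (L : Int)
    (dp : PySem.Dict (Int × Int) Int) (d : Nat) (rem : Nat) : PySem.Dict (Int × Int) Int :=
  match rem with
  | 0 => dp
  | rem + 1 =>
    if j - L + 1 < i + (d : Int) then dp
    else
      let a := i + (d : Int)
      let b := a + L - 1
      let best := (OBST_alt.minLoop dp a b 0 (b - a + 1).toNat none).getD 0
      OBST_alt.aLoop freq i j L
        (PySem.Dict.insert dp (a, b)
          (best + (PySem.List.slice freq (some a) (some (b + 1))).sum)) (d + 1) rem

-- 'for length in range(2, j - i + 2)': length = 2 + d, stop once length > j - i + 1.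
def OBST_alt.lenLoop (freq : List Int) (i : Int) (j : Int)
    (dp : PySem.Dict (Int × Int) Int) (d : Nat) (rem : Nat) : PySem.Dict (Int × Int) Int :=
  match rem with
  | 0 => dp
  | rem + 1 =>
    if j - i + 1 < 2 + (d : Int) then dp
    else
      let L := 2 + (d : Int)
      OBST_alt.lenLoop freq i j
        (OBST_alt.aLoop freq i j L dp 0 (j - L + 2 - i).toNat) (d + 1) rem

-- 'for a in range(i, j+1): dp[(a, a)] = freq[a]'; freq[a] is pyGet? (a raise outside
-- Python's index range is excluded by Pre_, so .getD 0 is never the raising case there).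
def OBST_alt.base (freq : List Int) (i : Int) (j : Int)
    (dp : PySem.Dict (Int × Int) Int) (d : Nat) (rem : Nat) : PySem.Dict (Int × Int) Int :=
  match rem with
  | 0 => dp
  | rem + 1 =>
    if j < i + (d : Int) then dp
    else
      OBST_alt.base freq i j
        (PySem.Dict.insert dp (i + (d : Int), i + (d : Int))
          ((PySem.List.pyGet? freq (i + (d : Int))).getD 0)) (d + 1) rem

-- the final 'return dp[(i, j)]': the key is always present for i ≤ j (KeyError impossible).
def OBST_alt (freq : List Int) (i : Int) (j : Int) : Int :=
  if i > j then 0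
  else
    let dp0 := OBST_alt.base freq i j PySem.Dict.empty 0 (j - i + 1).toNat
    let dp := OBST_alt.lenLoop freq i j dp0 0 (j - i).toNat
    (PySem.Dict.get? dp (i, j)).getD 0

-- ===== PRECONDITION & SPEC =====
-- Pre_ excludes exactly the inputs on which A raises IndexError: when i ≤ j, every index
-- m ∈ [i, j] is eventually read as freq[m], so all of them must be valid Python indices.
def Pre_OBST (freq : List Int) (i : Int) (j : Int) : Prop :=
  i > j ∨ (-(freq.length : Int) ≤ i ∧ j < (freq.length : Int))
instance (freq : List Int) (i : Int) (j : Int) : Decidable (Pre_OBST freq i j) := by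
  unfold Pre_OBST; infer_instance
def pvWitness_OBST : List Int × Int × Int := ([2, 3, 1], 0, 2)

def Spec_OBST (freq : List Int) (i : Int) (j : Int) (out : Int) : Prop := out = OBST_alt freq i j
instance (freq : List Int) (i : Int) (j : Int) (out : Int) : Decidable (Spec_OBST freq i j out) := by
  unfold Spec_OBST; infer_instance

-- ===== CLAIM (what is proved, stated in full; the proofs are below) =====
def Claim_equal_OBST : Prop := ∀ (freq : List Int) (i : Int) (j : Int), Dom_OBST freq i j → Pre_OBST freq i j → Spec_OBST freq i j (OBST freq i j)

-- ===== LEMMAS AND PROOFS =====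

-- every value stored in the table is the corresponding value of A
def Sound (freq : List Int) (m : PySem.Dict (Int × Int) Int) : Prop :=
  ∀ a b v, PySem.Dict.get? m (a, b) = some v → v = OBST freq a b

-- only nonempty intervals are ever stored
def KeysLE (m : PySem.Dict (Int × Int) Int) : Prop :=
  ∀ a b v, PySem.Dict.get? m (a, b) = some v → a ≤ b

-- all subintervals of [i, j] of length ≤ L are stored
def TblCompl (i : Int) (j : Int) (L : Int) (m : PySem.Dict (Int × Int) Int) : Prop :=
  ∀ a b : Int, i ≤ a → a ≤ b → b ≤ j → b - a + 1 ≤ L → (PySem.Dict.get? m (a, b)).isSome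

theorem OBST_empty (freq : List Int) (a b : Int) (h : b < a) : OBST freq a b = 0 := by
  unfold OBST; rw [OBST.go, if_pos (by omega)]

theorem getD_lookup (freq : List Int) (m : PySem.Dict (Int × Int) Int) (x y : Int)
    (hS : Sound freq m)
    (hP : x ≤ y → (PySem.Dict.get? m (x, y)).isSome) :
    PySem.Dict.getD m (x, y) 0 = OBST freq x y := by
  rw [PySem.Dict.getD_eq_get?_getD]
  cases h : PySem.Dict.get? m (x, y) with
  | some v => simp [hS x y v h]
  | none =>
    have hxy : y < x := by
      by_contra hc
      have := hP (by omega)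
      rw [h] at this; simp at this
    simp [OBST_empty freq x y hxy]

-- A's loop only feeds its rec the strict subintervals [a, b] ⊂ [i, j]; it is congruent there.
theorem loopA_congr (freq : List Int) (f g : Int → Int → Int) (i j : Int) :
    ∀ (rem d : Nat) (cost : Option Int),
      (∀ a b : Int, i ≤ a → b ≤ j → b - a < j - i → f a b = g a b) →
      OBST.loopA freq f i j d rem cost = OBST.loopA freq g i j d rem cost := by
  intro rem
  induction rem with
  | zero => intro d cost _; rfl
  | succ rem ih =>
    intro d cost h
    rw [OBST.loopA, OBST.loopA]
    by_cases h1 : j < i + (d : Int)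
    · rw [if_pos h1, if_pos h1]
    · rw [if_neg h1, if_neg h1]
      have hl : f i (i + (d : Int) - 1) = g i (i + (d : Int) - 1) := h _ _ le_rfl (by omega) (by omega)
      have hr : f (i + (d : Int) + 1) j = g (i + (d : Int) + 1) j := h _ _ (by omega) le_rfl (by omega)
      dsimp only
      rw [hl, hr]
      exact ih (d + 1) _ h

-- Fuel adequacy for port A: any sufficient fuel computes OBST's value.
theorem go_eq_OBST (freq : List Int) :
    ∀ (n : Nat) (a b : Int), (b - a + 1).toNat < n → OBST.go freq n a b = OBST freq a b := by
  intro n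
  induction n using Nat.strong_induction_on with
  | _ n ih =>
    intro a b hn
    match n, hn with
    | n + 1, hn =>
    unfold OBST
    rw [OBST.go, OBST.go]
    by_cases h1 : a > b
    · rw [if_pos h1, if_pos h1]
    · by_cases h2 : a = b
      · rw [if_neg h1, if_pos h2, if_neg h1, if_pos h2]
      · rw [if_neg h1, if_neg h2, if_neg h1, if_neg h2]
        dsimp only
        have hcong : OBST.loopA freq (OBST.go freq n) a b 0 (b - a + 1).toNat none =
            OBST.loopA freq (OBST.go freq (b - a + 1).toNat) a b 0 (b - a + 1).toNat none := by
          apply loopA_congr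
          intro x y hx hy hlt
          have hxy : (y - x + 1).toNat < n := by omega
          have hxy2 : (y - x + 1).toNat < (b - a + 1).toNat := by omega
          rw [ih n (by omega) x y hxy, ih (b - a + 1).toNat (by omega) x y hxy2]
        rw [hcong]

-- A's recursive case, with the loop's recursive calls replaced by OBST itself.
theorem OBST_step (freq : List Int) (a b : Int) (h : a < b) :
    OBST freq a b =
      (OBST.loopA freq (OBST freq) a b 0 (b - a + 1).toNat none).getD 0 +
        (PySem.List.slice freq (some a) (some (b + 1))).sum := by
  conv_lhs => unfold OBST
  rw [OBST.go, if_neg (by omega), if_neg (by omega)]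
  dsimp only
  congr 1
  congr 1
  apply loopA_congr
  intro x y hx hy hlt
  exact go_eq_OBST freq _ x y (by omega)

-- B's inner min-loop computes exactly A's loop with rec = OBST, once the table is sound
-- and complete for the looked-up subintervals.
theorem minLoop_eq (freq : List Int) (m : PySem.Dict (Int × Int) Int) (a b : Int)
    (hS : Sound freq m)
    (hP : ∀ x y : Int, a ≤ x → y ≤ b → y - x < b - a → x ≤ y →
      (PySem.Dict.get? m (x, y)).isSome) :
    ∀ (rem d : Nat) (cost : Option Int),
      OBST_alt.minLoop m a b d rem cost = OBST.loopA freq (OBST freq) a b d rem cost := by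
  intro rem
  induction rem with
  | zero => intro d cost; rfl
  | succ rem ih =>
    intro d cost
    rw [OBST_alt.minLoop, OBST.loopA]
    by_cases h1 : b < a + (d : Int)
    · rw [if_pos h1, if_pos h1]
    · rw [if_neg h1, if_neg h1]
      dsimp only
      rw [getD_lookup freq m a (a + (d : Int) - 1) hS
          (fun hle => hP _ _ le_rfl (by omega) (by omega) hle),
        getD_lookup freq m (a + (d : Int) + 1) b hS
          (fun hle => hP _ _ (by omega) le_rfl (by omega) hle)]
      exact ih (d + 1) _

-- one pass of the a-loop at length L upgrades completeness from L-1 to L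
theorem aLoop_inv (freq : List Int) (i j L : Int) (hL : 2 ≤ L) :
    ∀ (rem : Nat) (d : Nat) (dp : PySem.Dict (Int × Int) Int),
      Sound freq dp → KeysLE dp → TblCompl i j (L - 1) dp →
      (∀ a : Int, i ≤ a → a < i + (d : Int) → a + L - 1 ≤ j →
        (PySem.Dict.get? dp (a, a + L - 1)).isSome) →
      j - L + 2 - i - (d : Int) ≤ (rem : Int) →
      Sound freq (OBST_alt.aLoop freq i j L dp d rem) ∧
        KeysLE (OBST_alt.aLoop freq i j L dp d rem) ∧
        TblCompl i j L (OBST_alt.aLoop freq i j L dp d rem) := by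
  intro rem
  induction rem with
  | zero =>
    intro d dp hS hK hC hDone hFuel
    refine ⟨hS, hK, ?_⟩
    intro a b ha hab hb hlen
    by_cases hsm : b - a + 1 ≤ L - 1
    · exact hC a b ha hab hb hsm
    · have hb' : b = a + L - 1 := by omega
      subst hb'
      exact hDone a ha (by omega) (by omega)
  | succ rem ih =>
    intro d dp hS hK hC hDone hFuel
    rw [OBST_alt.aLoop]
    by_cases h1 : j - L + 1 < i + (d : Int)
    · rw [if_pos h1]
      refine ⟨hS, hK, ?_⟩
      intro a b ha hab hb hlen
      by_cases hsm : b - a + 1 ≤ L - 1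
      · exact hC a b ha hab hb hsm
      · have hb' : b = a + L - 1 := by omega
        subst hb'
        exact hDone a ha (by omega) (by omega)
    · rw [if_neg h1]
      dsimp only
      set a := i + (d : Int) with hadef
      set b := a + L - 1 with hbdef
      have hval : (OBST_alt.minLoop dp a b 0 (b - a + 1).toNat none).getD 0 +
          (PySem.List.slice freq (some a) (some (b + 1))).sum = OBST freq a b := by
        rw [minLoop_eq freq dp a b hS
          (fun x y hx hy hlt hxy => hC x y (by omega) hxy (by omega) (by omega))]
        exact (OBST_step freq a b (by omega)).symm
      apply ih (d + 1)
      · intro x y v hv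
        rw [PySem.Dict.get?_insert] at hv
        by_cases hxy : (x, y) = (a, b)
        · obtain ⟨rfl, rfl⟩ : x = a ∧ y = b := by simpa [Prod.ext_iff] using hxy
          rw [if_pos hxy] at hv
          cases hv
          exact hval
        · rw [if_neg hxy] at hv
          exact hS x y v hv
      · intro x y v hv
        rw [PySem.Dict.get?_insert] at hv
        by_cases hxy : (x, y) = (a, b)
        · obtain ⟨rfl, rfl⟩ : x = a ∧ y = b := by simpa [Prod.ext_iff] using hxy
          omega
        · rw [if_neg hxy] at hv
          exact hK x y v hv
      · intro x y hx hxy hy hlen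
        rw [PySem.Dict.get?_insert]
        by_cases hxy2 : (x, y) = (a, b)
        · rw [if_pos hxy2]; simp
        · rw [if_neg hxy2]
          exact hC x y hx hxy hy hlen
      · intro x hx hlt hxj
        rw [PySem.Dict.get?_insert]
        by_cases hxy2 : (x, x + L - 1) = (a, b)
        · rw [if_pos hxy2]; simp
        · rw [if_neg hxy2]
          have hxa : x ≠ a := by
            intro hcontra; apply hxy2; rw [hcontra, hbdef]
          exact hDone x hx (by omega) hxj
      · push_cast; omega

-- the length loop establishes completeness for all interval lengths up to j - i + 1
theorem lenLoop_inv (freq : List Int) (i j : Int) :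
    ∀ (rem : Nat) (d : Nat) (dp : PySem.Dict (Int × Int) Int),
      Sound freq dp → KeysLE dp → TblCompl i j (1 + (d : Int)) dp →
      j - i - (d : Int) ≤ (rem : Int) →
      Sound freq (OBST_alt.lenLoop freq i j dp d rem) ∧
        KeysLE (OBST_alt.lenLoop freq i j dp d rem) ∧
        TblCompl i j (j - i + 1) (OBST_alt.lenLoop freq i j dp d rem) := by
  intro rem
  induction rem with
  | zero =>
    intro d dp hS hK hC hFuel
    refine ⟨hS, hK, fun a b ha hab hb hlen => hC a b ha hab hb (by omega)⟩
  | succ rem ih =>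
    intro d dp hS hK hC hFuel
    rw [OBST_alt.lenLoop]
    by_cases h1 : j - i + 1 < 2 + (d : Int)
    · rw [if_pos h1]
      refine ⟨hS, hK, fun a b ha hab hb hlen => hC a b ha hab hb (by omega)⟩
    · rw [if_neg h1]
      dsimp only
      have h := aLoop_inv freq i j (2 + (d : Int)) (by omega)
        (j - (2 + (d : Int)) + 2 - i).toNat 0 dp hS hK
        (by intro a b ha hab hb hlen; exact hC a b ha hab hb (by omega))
        (by intro a _ h2 _; simp at h2; omega)
        (by push_cast; omega)
      have := ih (d + 1) _ h.1 h.2.1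
        (by simpa [show 1 + ((d : Int) + 1) = 2 + (d : Int) by omega] using h.2.2)
        (by push_cast; omega)
      simpa using this

-- the base loop stores every singleton interval, with A's value for it
theorem base_inv (freq : List Int) (i j : Int) :
    ∀ (rem : Nat) (d : Nat) (dp : PySem.Dict (Int × Int) Int),
      Sound freq dp → KeysLE dp →
      (∀ a : Int, i ≤ a → a < i + (d : Int) → a ≤ j →
        (PySem.Dict.get? dp (a, a)).isSome) →
      j - i + 1 - (d : Int) ≤ (rem : Int) →
      Sound freq (OBST_alt.base freq i j dp d rem) ∧
        KeysLE (OBST_alt.base freq i j dp d rem) ∧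
        TblCompl i j 1 (OBST_alt.base freq i j dp d rem) := by
  intro rem
  induction rem with
  | zero =>
    intro d dp hS hK hDone hFuel
    refine ⟨hS, hK, ?_⟩
    intro a b ha hab hb hlen
    have hba : b = a := by omega
    rw [hba]
    exact hDone a ha (by omega) (by omega)
  | succ rem ih =>
    intro d dp hS hK hDone hFuel
    rw [OBST_alt.base]
    by_cases h1 : j < i + (d : Int)
    · rw [if_pos h1]
      refine ⟨hS, hK, ?_⟩
      intro a b ha hab hb hlen
      have hba : b = a := by omega
      rw [hba]
      exact hDone a ha (by omega) (by omega)
    · rw [if_neg h1]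
      apply ih (d + 1)
      · intro x y v hv
        rw [PySem.Dict.get?_insert] at hv
        by_cases hxy : (x, y) = (i + (d : Int), i + (d : Int))
        · obtain ⟨rfl, rfl⟩ : x = i + (d : Int) ∧ y = i + (d : Int) := by
            simpa [Prod.ext_iff] using hxy
          rw [if_pos hxy] at hv
          cases hv
          unfold OBST
          rw [OBST.go, if_neg (by omega), if_pos rfl]
        · rw [if_neg hxy] at hv
          exact hS x y v hv
      · intro x y v hv
        rw [PySem.Dict.get?_insert] at hv
        by_cases hxy : (x, y) = (i + (d : Int), i + (d : Int))
        · obtain ⟨rfl, rfl⟩ : x = i + (d : Int) ∧ y = i + (d : Int) := by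
            simpa [Prod.ext_iff] using hxy
          omega
        · rw [if_neg hxy] at hv
          exact hK x y v hv
      · intro x hx hlt hxj
        rw [PySem.Dict.get?_insert]
        by_cases hxy : (x, x) = (i + (d : Int), i + (d : Int))
        · rw [if_pos hxy]; simp
        · rw [if_neg hxy]
          have : x ≠ i + (d : Int) := by
            intro hcontra; exact hxy (by rw [hcontra])
          exact hDone x hx (by omega) hxj
      · push_cast; omega

-- ===== VERDICT (by name: the statement is the Claim_ definition above) =====
theorem OBST_spec : Claim_equal_OBST := by
  intro freq i j _ _
  unfold Spec_OBST OBST_alt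
  by_cases hij : i > j
  · rw [if_pos hij]
    exact (OBST_empty freq i j (by omega)).symm ▸ rfl
  · rw [if_neg hij]
    dsimp only
    have h0 := base_inv freq i j (j - i + 1).toNat 0 PySem.Dict.empty
      (by intro a b v hv; simp [PySem.Dict.get?_empty] at hv)
      (by intro a b v hv; simp [PySem.Dict.get?_empty] at hv)
      (by intro a _ h2 _; simp at h2; omega)
      (by push_cast; omega)
    have h1 := lenLoop_inv freq i j (j - i).toNat 0 _ h0.1 h0.2.1
      (by simpa using h0.2.2) (by push_cast; omega)
    set dp := OBST_alt.lenLoop freq i j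
      (OBST_alt.base freq i j PySem.Dict.empty 0 (j - i + 1).toNat) 0 (j - i).toNat
    have hsome := h1.2.2 i j le_rfl (by omega) le_rfl (by omega)
    cases hg : PySem.Dict.get? dp (i, j) with
    | none => rw [hg] at hsome; simp at hsome
    | some v =>
      simp [h1.1 i j v hg]
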